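-- pv_equiv track=rewrite | github.com/Mimo53/ENSAI_Indexation_Web_TPs | TP1/crawler/priority.py | prioritize_links
-- ===== SOURCE A (Python) =====
-- def prioritize_links(links):
--     priority_links = []
--     normal_links = []
--
--     for link in links:
--         if "product" in link["url"].lower():
--             priority_links.append(link)
--         else:
--             normal_links.append(link)
--
--     return priority_links + normal_links
-- ===== SOURCE B (Python) =====
-- def prioritize_links(links):
--     # One stable sort instead of two accumulator lists + concatenation:
--     # key 0 for product links, 1 for the rest; stability keeps input order in each group.
--     return sorted(links, key=lambda link: 0 if "product" in link["url"].lower() else 1)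
-- ===== Notes on version B (the rewrite author's own statement) =====
-- stated objective: idiomatic
-- what changed: Replaced the two-accumulator partition-and-concatenate loop with a single stable sort on a 0/1 key ('product' in url), relying on sort stability to preserve input order within each group.
import Mathlib
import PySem

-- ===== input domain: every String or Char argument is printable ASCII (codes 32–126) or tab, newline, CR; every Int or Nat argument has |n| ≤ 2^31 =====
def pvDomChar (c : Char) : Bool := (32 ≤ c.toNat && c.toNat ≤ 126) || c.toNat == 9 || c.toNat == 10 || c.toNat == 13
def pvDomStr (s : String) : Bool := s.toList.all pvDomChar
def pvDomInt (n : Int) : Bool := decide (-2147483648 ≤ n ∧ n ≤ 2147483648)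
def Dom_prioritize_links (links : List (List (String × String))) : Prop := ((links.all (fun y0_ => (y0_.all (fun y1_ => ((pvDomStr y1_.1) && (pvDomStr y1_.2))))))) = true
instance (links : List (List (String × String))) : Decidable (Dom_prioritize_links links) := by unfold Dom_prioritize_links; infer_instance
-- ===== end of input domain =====

-- B replaces the partition-then-concatenate loop with one stable sort on a 0/1 key (idiomatic).
-- ===== PORT A =====
-- "product" in link["url"].lower(); the lookup is exact under Pre_ (key "url" present; Python raises KeyError otherwise)
def pvIsProduct (link : List (String × String)) : Bool :=
  PySem.Str.isIn "product" (PySem.Str.lower (PySem.Dict.getD (PySem.Dict.mk link) "url" ""))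

def prioritize_links (links : List (List (String × String))) : List (List (String × String)) :=
  let acc := links.foldl
    (fun (acc : List (List (String × String)) × List (List (String × String))) link =>
      if pvIsProduct link then (acc.1 ++ [link], acc.2) else (acc.1, acc.2 ++ [link]))
    ([], [])
  acc.1 ++ acc.2

-- ===== PORT B =====
def prioritize_links_alt (links : List (List (String × String))) : List (List (String × String)) :=
  PySem.List.sorted links (fun link => if pvIsProduct link then (0 : Int) else 1) false

-- ===== PRECONDITION & SPEC =====
-- Pre_ excludes links missing the "url" key, on which Python A raises KeyError.
def Pre_prioritize_links (links : List (List (String × String))) : Prop :=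
  ∀ link ∈ links, (PySem.Dict.mk link).contains "url" = true
instance (links : List (List (String × String))) : Decidable (Pre_prioritize_links links) := by
  unfold Pre_prioritize_links; infer_instance

def pvWitness_prioritize_links : (List (List (String × String))) :=
  [[("url", "http://x/Product/1")], [("url", "http://x/about")]]

def Spec_prioritize_links (links : List (List (String × String))) (out : List (List (String × String))) : Prop := out = prioritize_links_alt links
instance (links : List (List (String × String))) (out : List (List (String × String))) : Decidable (Spec_prioritize_links links out) := by unfold Spec_prioritize_links; infer_instance

-- ===== CLAIM (what is proved, stated in full; the proofs are below) =====
def Claim_equal_prioritize_links : Prop := ∀ (links : List (List (String × String))), Dom_prioritize_links links → Pre_prioritize_links links → Spec_prioritize_links links (prioritize_links links)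

-- ===== LEMMAS AND PROOFS =====

-- A's foldl accumulates exactly (filter, filter-not)
theorem pvA_foldl (links P N : List (List (String × String))) :
    links.foldl
      (fun (acc : List (List (String × String)) × List (List (String × String))) link =>
        if pvIsProduct link then (acc.1 ++ [link], acc.2) else (acc.1, acc.2 ++ [link]))
      (P, N)
    = (P ++ links.filter (fun l => pvIsProduct l),
       N ++ links.filter (fun l => !pvIsProduct l)) := by
  induction links generalizing P N with
  | nil => simp
  | cons x xs ih =>
    by_cases hx : pvIsProduct x <;> simp [hx, ih]

-- insertBy places x after the block where `before x ·` is false, before the block where it is true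
theorem pvInsertBy_partition {α : Type} (before : α → α → Bool) (x : α) (P N : List α)
    (hP : ∀ y ∈ P, before x y = false) (hN : ∀ z ∈ N, before x z = true) :
    PySem.List.insertBy before x (P ++ N) = P ++ x :: N := by
  induction P with
  | nil =>
    cases N with
    | nil => simp [PySem.List.insertBy]
    | cons z zs => simp [PySem.List.insertBy, hN z (by simp)]
  | cons y ys ih =>
    have hy : before x y = false := hP y (by simp)
    simp only [List.cons_append, PySem.List.insertBy, hy, Bool.false_eq_true, if_false,
      List.cons.injEq, true_and]
    exact ih (fun y' hy' => hP y' (by simp [hy'])) 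

-- the insertion-sort foldl with a 0/1 key keeps the two groups in order
theorem pvB_foldl (links P N : List (List (String × String)))
    (hP : ∀ y ∈ P, pvIsProduct y = true) (hN : ∀ z ∈ N, pvIsProduct z = false) :
    links.foldl
      (fun acc x =>
        PySem.List.insertBy
          (fun a b => decide ((if pvIsProduct a then (0 : Int) else 1) < (if pvIsProduct b then (0 : Int) else 1)))
          x acc)
      (P ++ N)
    = (P ++ links.filter (fun l => pvIsProduct l)) ++ (N ++ links.filter (fun l => !pvIsProduct l)) := by
  induction links generalizing P N with
  | nil => simp
  | cons x xs ih =>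
    by_cases hx : pvIsProduct x
    · have hins : PySem.List.insertBy
          (fun a b => decide ((if pvIsProduct a then (0 : Int) else 1) < (if pvIsProduct b then (0 : Int) else 1)))
          x (P ++ N) = P ++ x :: N := by
        apply pvInsertBy_partition
        · intro y hy; simp [hx, hP y hy]
        · intro z hz; simp [hx, hN z hz]
      have := ih (P ++ [x]) N
        (by intro y hy; rcases List.mem_append.1 hy with h | h
            · exact hP y h
            · simp at h; simpa [h] using hx)
        hN
      simpa [List.foldl_cons, hins, hx, List.append_assoc] using this
    · have hins : PySem.List.insertBy
          (fun a b => decide ((if pvIsProduct a then (0 : Int) else 1) < (if pvIsProduct b then (0 : Int) else 1)))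
          x (P ++ N) = (P ++ N) ++ x :: [] := by
        have := pvInsertBy_partition
          (fun a b => decide ((if pvIsProduct a then (0 : Int) else 1) < (if pvIsProduct b then (0 : Int) else 1)))
          x (P ++ N) []
          (by intro y hy
              rcases List.mem_append.1 hy with h | h
              · simp [hx, hP y h]
              · simp [hx, hN y h])
          (by intro z hz; simp at hz)
        simpa using this
      have := ih P (N ++ [x]) hP
        (by intro z hz; rcases List.mem_append.1 hz with h | h
            · exact hN z h
            · simp at h; subst h; simpa using hx)
      simpa [List.foldl_cons, hins, hx, List.append_assoc] using this

theorem pvB_eq_partition (links : List (List (String × String))) :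
    prioritize_links_alt links
      = links.filter (fun l => pvIsProduct l) ++ links.filter (fun l => !pvIsProduct l) := by
  have h := PySem.List.sorted_eq_foldl_insertBy links
      (fun link => if pvIsProduct link then (0 : Int) else 1)
  have h2 := pvB_foldl links [] [] (by simp) (by simp)
  simpa [prioritize_links_alt, h] using h2

-- ===== VERDICT (by name: the statement is the Claim_ definition above) =====
theorem prioritize_links_spec : Claim_equal_prioritize_links := by
  intro links _ _
  show prioritize_links links = prioritize_links_alt links
  rw [pvB_eq_partition]
  simp [prioritize_links, pvA_foldl links [] []]
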